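-- pv_equiv track=rewrite | github.com/AdenK2027/Polling-Statistics-Hub | src/analytics.py | field_sort
-- ===== SOURCE A (Python) =====
-- def field_sort(list):
--     new_list = []
--     if 'senior policy' in list:
--         new_list.append('senior policy')
--     if 'junior policy' in list:
--         new_list.append('junior policy')
--     if 'policy' in list:
--         new_list.append('policy')
--     list.sort()
--     for item in list:
--         if item not in new_list:
--             new_list.append(item)
--     if 'unknown' in new_list:
--         new_list.pop(new_list.index('unknown'))
--         new_list.append('unknown')
--     return new_list
-- ===== SOURCE B (Python) =====
-- def field_sort(list):
--     list.sort()
--     pri = {'senior policy': '0', 'junior policy': '1', 'policy': '2', 'unknown': '4'}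
--     return sorted(set(list), key=lambda x: pri.get(x, '3' + x))
-- ===== Notes on version B (the rewrite author's own statement) =====
-- stated objective: simpler
-- what changed: Replaces A's if-append prefix, explicit dedup loop (with a linear 'not in new_list' scan per item) and pop/relocate of 'unknown' by a single priority-keyed sort over the deduplicated items (rank prefix '0'/'1'/'2' for the policy fields, '4' for 'unknown', '3'+name otherwise).
import Mathlib
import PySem

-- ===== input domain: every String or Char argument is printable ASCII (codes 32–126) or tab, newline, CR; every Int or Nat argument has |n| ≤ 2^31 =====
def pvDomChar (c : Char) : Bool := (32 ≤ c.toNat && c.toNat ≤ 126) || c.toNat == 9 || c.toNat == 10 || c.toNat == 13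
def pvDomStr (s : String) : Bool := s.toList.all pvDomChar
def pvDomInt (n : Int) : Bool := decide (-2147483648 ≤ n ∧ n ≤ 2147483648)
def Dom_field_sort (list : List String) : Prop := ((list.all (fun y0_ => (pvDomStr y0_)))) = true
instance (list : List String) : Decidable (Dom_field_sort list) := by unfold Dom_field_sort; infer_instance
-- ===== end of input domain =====

-- B replaces A's if-chain prefix, dedup loop and pop/relocate of 'unknown' by one priority-keyed
-- sort over the deduplicated items (objective: simpler). Like A, B sorts the argument in place;
-- the equivalence proved here is about the return value (B performs the same mutation).

-- ===== PORT A =====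
def field_sort (list : List String) : List String :=
  let new_list : List String := []
  let new_list := if "senior policy" ∈ list then new_list ++ ["senior policy"] else new_list
  let new_list := if "junior policy" ∈ list then new_list ++ ["junior policy"] else new_list
  let new_list := if "policy" ∈ list then new_list ++ ["policy"] else new_list
  let list := PySem.List.sorted list (fun x => x) false
  let new_list := list.foldl (fun acc item => if item ∈ acc then acc else acc ++ [item]) new_list
  if "unknown" ∈ new_list then
    match PySem.List.index? new_list "unknown" with
    | some i =>
      match PySem.List.pop? new_list (i : Int) with
      | some (_, rest) => rest ++ ["unknown"]
      | none => new_list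
    | none => new_list
  else new_list

-- ===== PORT B =====
def pvPri : PySem.Dict String String :=
  ⟨[("senior policy", "0"), ("junior policy", "1"), ("policy", "2"), ("unknown", "4")]⟩

def field_sort_alt (list : List String) : List String :=
  let list := PySem.List.sorted list (fun x => x) false
  PySem.List.sorted (PySem.Set.ofList list) (fun x => PySem.Dict.getD pvPri x ("3" ++ x)) false

-- ===== PRECONDITION & SPEC =====
def Spec_field_sort (list : List String) (out : List String) : Prop := out = field_sort_alt list
instance (list : List String) (out : List String) : Decidable (Spec_field_sort list out) := by unfold Spec_field_sort; infer_instance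

-- ===== CLAIM (what is proved, stated in full; the proofs are below) =====
def Claim_equal_field_sort : Prop := ∀ (list : List String), Dom_field_sort list → Spec_field_sort list (field_sort list)

-- ===== LEMMAS AND PROOFS =====

-- B's sort key, written as an if-chain (pointwise equal to the Dict lookup of the port)
def keyB (x : String) : String :=
  if x = "senior policy" then "0"
  else if x = "junior policy" then "1"
  else if x = "policy" then "2"
  else if x = "unknown" then "4"
  else "3" ++ x

theorem keyB_eq_getD : (fun x => PySem.Dict.getD pvPri x ("3" ++ x)) = keyB := by
  funext x
  by_cases h1 : x = "senior policy" <;> by_cases h2 : x = "junior policy" <;>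
    by_cases h3 : x = "policy" <;> by_cases h4 : x = "unknown" <;>
    [skip; skip; skip; skip; skip; skip; skip; skip; skip; skip; skip; skip; skip; skip; skip;
     (have e1 : ("senior policy" == x) = false := by simpa [ne_comm] using h1
      have e2 : ("junior policy" == x) = false := by simpa [ne_comm] using h2
      have e3 : ("policy" == x) = false := by simpa [ne_comm] using h3
      have e4 : ("unknown" == x) = false := by simpa [ne_comm] using h4
      simp [keyB, pvPri, PySem.Dict.getD, PySem.Dict.get?, List.find?, h1, h2, h3, h4, e1, e2, e3, e4])] <;>
    simp [keyB, pvPri, PySem.Dict.getD, PySem.Dict.get?, List.find?, h1, h2, h3, h4]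

-- A's dedup-append loop body
def fA (acc : List String) (item : String) : List String :=
  if item ∈ acc then acc else acc ++ [item]

theorem fA_eq_add : PySem.Set.add (α := String) = fA := by
  funext s x
  simp only [PySem.Set.add, PySem.Set.contains, fA]
  by_cases h : x ∈ s <;> simp [h]

theorem ofList_eq_foldl_fA (xs : List String) :
    PySem.Set.ofList xs = xs.foldl fA [] := by
  rw [PySem.Set.ofList_eq_foldl, fA_eq_add]

-- A's dedup loop splits as: already-collected prefix ++ fresh first occurrences
theorem foldl_fA (xs : List String) : ∀ s : List String,
    xs.foldl fA s = s ++ (PySem.Set.ofList xs).filter (fun y => decide (y ∉ s)) := by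
  induction xs with
  | nil => intro s; simp [PySem.Set.ofList]
  | cons x xs ih =>
    intro s
    rw [ofList_eq_foldl_fA]
    simp only [List.foldl_cons]
    have hx1 : fA [] x = [x] := by simp [fA]
    rw [hx1, ih [x]]
    by_cases hx : x ∈ s
    · have hfa : fA s x = s := by simp [fA, hx]
      rw [hfa, ih s]
      simp only [List.filter_append, List.filter_filter, List.append_cancel_left_eq]
      have he : List.filter (fun y => decide (y ∉ s)) [x] = [] := by simp [hx]
      rw [he]
      simp only [List.nil_append]
      apply List.filter_congr
      intro y _
      by_cases hyx : y = x
      · subst hyx; simp [hx]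
      · simp [hyx]
    · have hfa : fA s x = s ++ [x] := by simp [fA, hx]
      rw [hfa, ih (s ++ [x])]
      simp only [List.filter_append, List.filter_filter, List.append_assoc,
        List.append_cancel_left_eq]
      have he : List.filter (fun y => decide (y ∉ s)) [x] = [x] := by simp [hx]
      rw [he]
      simp only [List.singleton_append, List.cons.injEq, true_and]
      apply List.filter_congr
      intro y _
      by_cases hyx : y = x
      · subst hyx; simp
      · simp [hyx, List.mem_append]

theorem sub_foldl_fA (xs : List String) : ∀ s : List String,
    ∃ t, xs.foldl fA s = s ++ t ∧ t.Sublist xs := by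
  induction xs with
  | nil => intro s; exact ⟨[], by simp, List.Sublist.refl _⟩
  | cons x xs ih =>
    intro s
    by_cases hx : x ∈ s
    · obtain ⟨t, ht, hs⟩ := ih s
      exact ⟨t, by simpa [fA, hx] using ht, hs.cons x⟩
    · obtain ⟨t, ht, hs⟩ := ih (s ++ [x])
      exact ⟨x :: t, by simpa [fA, hx] using ht, hs.cons₂ x⟩

theorem ofList_sublist (xs : List String) : (PySem.Set.ofList xs : List String).Sublist xs := by
  obtain ⟨t, ht, hs⟩ := sub_foldl_fA xs []
  rw [ofList_eq_foldl_fA, ht]; simpa using hs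

-- key-order facts ---------------------------------------------------------

theorem key_reg (y : String) (h1 : y ≠ "senior policy") (h2 : y ≠ "junior policy")
    (h3 : y ≠ "policy") (h4 : y ≠ "unknown") : keyB y = "3" ++ y := by
  simp [keyB, h1, h2, h3, h4]

theorem three_lt (c : Char) (y : String) (hc : c < '3') : String.ofList [c] < "3" ++ y := by
  rw [String.lt_iff_toList_lt]
  have := List.Lex.rel (r := (· < ·)) (l₁ := ([] : List Char)) (l₂ := y.toList) hc
  simpa [String.toList_append]

theorem reg_lt_four (y : String) : ("3" ++ y : String) < "4" := by
  rw [String.lt_iff_toList_lt]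
  simpa [String.toList_append] using List.Lex.rel (r := (· < ·)) (show ('3':Char) < '4' by decide)

theorem reg_mono (y z : String) (h : y < z) : ("3" ++ y : String) < "3" ++ z := by
  rw [String.lt_iff_toList_lt] at h ⊢
  simpa [String.toList_append] using h

theorem key_pre_lt (p y : String)
    (hp : p = "senior policy" ∨ p = "junior policy" ∨ p = "policy")
    (h1 : y ≠ "senior policy") (h2 : y ≠ "junior policy") (h3 : y ≠ "policy") :
    keyB p < keyB y := by
  have hkp : keyB p = "0" ∨ keyB p = "1" ∨ keyB p = "2" := by
    rcases hp with h | h | h <;> subst h <;> simp [keyB]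
  by_cases h4 : y = "unknown"
  · subst h4
    have : keyB "unknown" = "4" := by simp [keyB]
    rw [this]
    rcases hkp with h | h | h <;> rw [h] <;> rw [String.lt_iff_toList_lt] <;> decide
  · rw [key_reg y h1 h2 h3 h4]
    rcases hkp with h | h | h <;> rw [h]
    · rw [show ("0":String) = String.ofList ['0'] from by decide]
      exact three_lt '0' y (by decide)
    · rw [show ("1":String) = String.ofList ['1'] from by decide]
      exact three_lt '1' y (by decide)
    · rw [show ("2":String) = String.ofList ['2'] from by decide]
      exact three_lt '2' y (by decide)

-- the heart of the proof: A's tail computation equals B's keyed sort, for any prefix `pre`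
-- that collects exactly the special fields present in `list`
theorem eraseIdx_len (l1 l2 : List String) (u : String) :
    (l1 ++ u :: l2).eraseIdx l1.length = l1 ++ l2 := by
  induction l1 with
  | nil => simp
  | cons a l ih => simp [ih]

theorem tailA (list pre : List String)
    (hnd : pre.Nodup)
    (hmem : ∀ p ∈ pre, p ∈ list)
    (hsp : ∀ p ∈ pre, p = "senior policy" ∨ p = "junior policy" ∨ p = "policy")
    (hall : ∀ x ∈ list, (x = "senior policy" ∨ x = "junior policy" ∨ x = "policy") → x ∈ pre)
    (hpw : pre.Pairwise (fun a b => keyB a < keyB b)) :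
    (let nl := (PySem.List.sorted list (fun x => x) false).foldl fA pre
     if "unknown" ∈ nl then
       match PySem.List.index? nl "unknown" with
       | some i =>
         match PySem.List.pop? nl (i : Int) with
         | some (_, rest) => rest ++ ["unknown"]
         | none => nl
       | none => nl
     else nl) =
    PySem.List.sorted (PySem.Set.ofList (PySem.List.sorted list (fun x => x) false)) keyB false := by
  simp only []
  rw [foldl_fA]
  set S := PySem.List.sorted list (fun x => x) false with hS
  set O := PySem.Set.ofList S with hO
  set T := O.filter (fun y => decide (y ∉ pre)) with hT
  -- basic facts
  have hOnd : O.Nodup := PySem.Set.nodup_ofList S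
  have hOle : O.Pairwise (fun a b => a ≤ b) :=
    List.Pairwise.sublist (ofList_sublist S) (PySem.List.sorted_pairwise list (fun x => x))
  have hOlt : O.Pairwise (fun a b => a < b) :=
    (hOle.and hOnd).imp fun h => lt_of_le_of_ne h.1 h.2
  have hmemO : ∀ y, y ∈ O ↔ y ∈ list := fun y =>
    (PySem.Set.mem_ofList S y).trans (PySem.List.mem_sorted list (fun x => x) false y)
  have hTO : T.Sublist O := List.filter_sublist
  have hTlt : T.Pairwise (fun a b => a < b) := List.Pairwise.sublist hTO hOlt
  have hTnd : T.Nodup := hOnd.sublist hTO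
  have hTpre : ∀ y ∈ T, y ∉ pre := by
    intro y hy
    have := (List.mem_filter.mp hy).2
    simpa using this
  have hTlist : ∀ y ∈ T, y ∈ list := fun y hy => (hmemO y).mp (hTO.mem hy)
  have hTreg : ∀ y ∈ T, y ≠ "senior policy" ∧ y ≠ "junior policy" ∧ y ≠ "policy" := by
    intro y hy
    refine ⟨?_, ?_, ?_⟩ <;> intro h <;>
      exact hTpre y hy (hall y (hTlist y hy) (by simp [h]))
  have hnd : (pre ++ T).Nodup := by
    rw [List.nodup_append]
    refine ⟨hnd, hTnd, ?_⟩
    intro a ha b hb h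
    exact hTpre b hb (h ▸ ha)
  have hperm : (pre ++ T).Perm O := by
    rw [List.perm_ext_iff_of_nodup hnd hOnd]
    intro a
    constructor
    · intro h
      rcases List.mem_append.mp h with h | h
      · exact (hmemO a).mpr (hmem a h)
      · exact hTO.mem h
    · intro h
      by_cases hp : a ∈ pre
      · exact List.mem_append.mpr (Or.inl hp)
      · exact List.mem_append.mpr (Or.inr (List.mem_filter.mpr ⟨h, by simpa using hp⟩))
  have hcross : ∀ p ∈ pre, ∀ y ∈ T, keyB p < keyB y := by
    intro p hp y hy
    obtain ⟨h1, h2, h3⟩ := hTreg y hy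
    exact key_pre_lt p y (hsp p hp) h1 h2 h3
  by_cases hu : "unknown" ∈ pre ++ T
  · -- 'unknown' present: A pops its first occurrence and appends it
    rw [if_pos hu]
    have hupre : "unknown" ∉ pre := by
      intro h
      rcases hsp _ h with h' | h' | h' <;> exact absurd h' (by decide)
    obtain ⟨k, hk⟩ := Option.isSome_iff_exists.mp
      ((PySem.List.index?_isSome_iff (pre ++ T) "unknown").mpr hu)
    obtain ⟨l1, l2, hnl12, hlen, hul1⟩ :=
      (PySem.List.index?_eq_some_iff (pre ++ T) "unknown" k).mp hk
    have hklen : k < (pre ++ T).length := by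
      rw [hnl12, ← hlen]; simp
    rw [hk]
    simp only [PySem.List.pop?_natCast (pre ++ T) k hklen]
    have herase : (pre ++ T).eraseIdx k = (pre ++ T).erase "unknown" := by
      rw [hnl12, ← hlen, eraseIdx_len, List.erase_append_right _ hul1, List.erase_cons_head]
    rw [herase]
    have hTe : (pre ++ T).erase "unknown" = pre ++ T.filter (· != "unknown") := by
      rw [List.erase_append_right _ hupre, hTnd.erase_eq_filter]
    rw [hTe]
    set T' := T.filter (· != "unknown") with hT'
    have hT'T : T'.Sublist T := List.filter_sublist
    have hT'no : ∀ y ∈ T', y ≠ "unknown" := by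
      intro y hy
      have := (List.mem_filter.mp hy).2
      simpa using this
    have hkT' : ∀ y ∈ T', keyB y = "3" ++ y := by
      intro y hy
      obtain ⟨h1, h2, h3⟩ := hTreg y (hT'T.mem hy)
      exact key_reg y h1 h2 h3 (hT'no y hy)
    symm
    apply PySem.List.sorted_eq_of_perm_of_pairwise_lt
    · -- permutation
      have e1 : ((pre ++ T') ++ ["unknown"]).Perm ("unknown" :: (pre ++ T')) :=
        List.perm_append_singleton _ _
      have e2 : ("unknown" :: (pre ++ T')).Perm (pre ++ T) := by
        rw [← hTe]
        exact (List.perm_cons_erase hu).symm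
      exact (e1.trans e2).trans hperm
    · -- strict key ordering
      rw [List.pairwise_append]
      refine ⟨?_, by simp, ?_⟩
      · rw [List.pairwise_append]
        refine ⟨hpw, ?_, ?_⟩
        · apply (List.Pairwise.sublist hT'T hTlt).imp_of_mem
          intro a b ha hb hab
          rw [hkT' a ha, hkT' b hb]
          exact reg_mono a b hab
        · intro p hp y hy
          exact hcross p hp y (hT'T.mem hy)
      · intro a ha b hb
        obtain rfl := List.mem_singleton.mp hb
        have hk4 : keyB "unknown" = "4" := by simp [keyB]
        rw [hk4]
        rcases List.mem_append.mp ha with h | h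
        · rcases hsp _ h with h' | h' | h' <;> subst h' <;>
            simp only [keyB, if_true] <;> rw [String.lt_iff_toList_lt] <;> decide
        · rw [hkT' a h]
          exact reg_lt_four a
  · rw [if_neg hu]
    have huT : "unknown" ∉ T := fun h => hu (List.mem_append.mpr (Or.inr h))
    symm
    apply PySem.List.sorted_eq_of_perm_of_pairwise_lt
    · exact hperm
    · rw [List.pairwise_append]
      refine ⟨hpw, ?_, hcross⟩
      apply hTlt.imp_of_mem
      intro a b ha hb hab
      obtain ⟨a1, a2, a3⟩ := hTreg a ha
      obtain ⟨b1, b2, b3⟩ := hTreg b hb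
      rw [key_reg a a1 a2 a3 (fun h => huT (h ▸ ha)),
          key_reg b b1 b2 b3 (fun h => huT (h ▸ hb))]
      exact reg_mono a b hab

-- the prefix A builds with its three `if ... in list` appends
def preOf (list : List String) : List String :=
  let n0 : List String := []
  let n1 := if "senior policy" ∈ list then n0 ++ ["senior policy"] else n0
  let n2 := if "junior policy" ∈ list then n1 ++ ["junior policy"] else n1
  if "policy" ∈ list then n2 ++ ["policy"] else n2

theorem pre_nodup (l : List String) : (preOf l).Nodup := by
  unfold preOf; split_ifs <;> decide

theorem pre_mem (l : List String) : ∀ p ∈ preOf l, p ∈ l := by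
  unfold preOf
  split_ifs <;> intro p hp <;> simp at hp <;> aesop

theorem pre_sp (l : List String) :
    ∀ p ∈ preOf l, p = "senior policy" ∨ p = "junior policy" ∨ p = "policy" := by
  unfold preOf; split_ifs <;> decide

theorem pre_all (l : List String) :
    ∀ x ∈ l, (x = "senior policy" ∨ x = "junior policy" ∨ x = "policy") → x ∈ preOf l := by
  unfold preOf; split_ifs <;> intro x hx hs <;> rcases hs with rfl | rfl | rfl <;> simp_all

theorem pre_pw (l : List String) : (preOf l).Pairwise (fun a b => keyB a < keyB b) := by
  have e1 : keyB "senior policy" = "0" := by simp [keyB]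
  have e2 : keyB "junior policy" = "1" := by simp [keyB]
  have e3 : keyB "policy" = "2" := by simp [keyB]
  have l01 : keyB "senior policy" < keyB "junior policy" := by
    rw [e1, e2, String.lt_iff_toList_lt]; decide
  have l02 : keyB "senior policy" < keyB "policy" := by
    rw [e1, e3, String.lt_iff_toList_lt]; decide
  have l12 : keyB "junior policy" < keyB "policy" := by
    rw [e2, e3, String.lt_iff_toList_lt]; decide
  unfold preOf
  split_ifs <;> simp_all [List.pairwise_cons]

-- ===== VERDICT (by name: the statement is the Claim_ definition above) =====
theorem field_sort_spec : Claim_equal_field_sort := by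
  intro list _
  show field_sort list = field_sort_alt list
  have h := tailA list (preOf list) (pre_nodup list) (pre_mem list) (pre_sp list)
    (pre_all list) (pre_pw list)
  unfold field_sort field_sort_alt
  rw [keyB_eq_getD]
  exact h
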